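-- pv_equiv track=rewrite | github.com/zhangxc11/nanobot-skills | todo/scripts/todo.py | find_todo
-- ===== SOURCE A (Python) =====
-- def find_todo(todos: list[dict], todo_id: str) -> dict | None:
--     """Find by exact match or prefix match (>= 4 chars)."""
--     for t in todos:
--         if t["id"] == todo_id:
--             return t
--     if len(todo_id) >= 4:
--         matches = [t for t in todos if t["id"].startswith(todo_id)]
--         if len(matches) == 1:
--             return matches[0]
--     return None
-- ===== SOURCE B (Python) =====
-- def find_todo(todos: list[dict], todo_id: str) -> dict | None:
--     """Find by exact match or prefix match (>= 4 chars) in one pass."""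
--     want_prefix = len(todo_id) >= 4
--     prefix_hit = None
--     prefix_count = 0
--     for t in todos:
--         tid = t["id"]
--         if tid == todo_id:
--             return t
--         if want_prefix and tid.startswith(todo_id):
--             prefix_count += 1
--             if prefix_hit is None:
--                 prefix_hit = t
--     return prefix_hit if prefix_count == 1 else None
-- ===== Notes on version B (the rewrite author's own statement) =====
-- stated objective: alternative
-- what changed: A scans twice (an exact-match loop, then a list comprehension collecting all prefix matches and checking its length); B makes a single pass that returns on an exact match and otherwise maintains only the first prefix hit and a running count, so no match list is built.
import Mathlib
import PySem

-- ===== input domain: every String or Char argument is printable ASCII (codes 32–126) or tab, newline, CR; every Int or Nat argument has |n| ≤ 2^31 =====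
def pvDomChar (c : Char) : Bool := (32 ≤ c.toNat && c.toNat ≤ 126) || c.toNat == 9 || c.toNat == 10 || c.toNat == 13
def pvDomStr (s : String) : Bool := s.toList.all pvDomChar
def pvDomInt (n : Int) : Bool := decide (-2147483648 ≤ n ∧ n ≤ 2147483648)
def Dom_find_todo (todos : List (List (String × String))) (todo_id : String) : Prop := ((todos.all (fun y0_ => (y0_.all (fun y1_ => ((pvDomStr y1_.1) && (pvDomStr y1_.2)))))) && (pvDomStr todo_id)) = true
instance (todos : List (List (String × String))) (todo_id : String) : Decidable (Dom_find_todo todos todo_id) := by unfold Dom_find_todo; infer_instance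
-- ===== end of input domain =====

-- B fuses A's two scans into one pass that keeps only the first prefix hit and a count (objective: alternative).


-- t["id"]: first-match association-list lookup; total form, used under Pre_ (key present)
def getIdD (t : List (String × String)) : String :=
  PySem.Dict.getD (PySem.Dict.mk t) "id" ""

-- ===== PORT A =====
-- the first 'for' loop of A: first t with t["id"] == todo_id
def findExact (todos : List (List (String × String))) (todo_id : String) : Option (List (String × String)) :=
  match todos with
  | [] => none
  | t :: rest => if getIdD t == todo_id then some t else findExact rest todo_id

def find_todo (todos : List (List (String × String))) (todo_id : String) : Option (List (String × String)) :=
  match findExact todos todo_id with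
  | some t => some t
  | none =>
    if 4 ≤ PySem.Str.len todo_id then
      let cands := todos.filter (fun t => PySem.Str.startswith (getIdD t) todo_id)
      if cands.length == 1 then PySem.List.pyGet? cands 0 else none
    else none

-- ===== PORT B =====
-- B's single loop: state = (prefix_hit, prefix_count)
def altLoop (todo_id : String) (want : Bool) :
    List (List (String × String)) → Option (List (String × String)) → Int → Option (List (String × String))
  | [], hit, cnt => if cnt == 1 then hit else none
  | t :: rest, hit, cnt =>
    let tid := getIdD t
    if tid == todo_id then some t
    else if want && PySem.Str.startswith tid todo_id then
      altLoop todo_id want rest (if hit.isNone then some t else hit) (cnt + 1)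
    else altLoop todo_id want rest hit cnt

def find_todo_alt (todos : List (List (String × String))) (todo_id : String) : Option (List (String × String)) :=
  altLoop todo_id (decide (4 ≤ PySem.Str.len todo_id)) todos none 0

-- ===== PRECONDITION & SPEC =====
-- Pre_ excludes exactly the inputs on which A raises KeyError (the scan reaches a todo without
-- the key "id"): it holds when every todo has "id", or an exact match occurs no later than the
-- first id-less todo.
def Pre_find_todo (todos : List (List (String × String))) (todo_id : String) : Prop :=
  (∀ t ∈ todos, (PySem.Dict.mk t).contains "id" = true) ∨
  (∃ i < todos.length,
     (todos[i]?.any fun t => (PySem.Dict.mk t).get? "id" == some todo_id) = true ∧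
     ∀ t ∈ todos.take (i + 1), (PySem.Dict.mk t).contains "id" = true)
instance (todos : List (List (String × String))) (todo_id : String) : Decidable (Pre_find_todo todos todo_id) := by unfold Pre_find_todo; infer_instance

def pvWitness_find_todo : (List (List (String × String))) × String :=
  ([[("id", "abcd"), ("text", "x")], [("id", "abzz")]], "abcd")

def Spec_find_todo (todos : List (List (String × String))) (todo_id : String) (out : Option (List (String × String))) : Prop := out = find_todo_alt todos todo_id
instance (todos : List (List (String × String))) (todo_id : String) (out : Option (List (String × String))) : Decidable (Spec_find_todo todos todo_id out) := by unfold Spec_find_todo; infer_instance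

-- ===== CLAIM (what is proved, stated in full; the proofs are below) =====
def Claim_equal_find_todo : Prop := ∀ (todos : List (List (String × String))) (todo_id : String), Dom_find_todo todos todo_id → Pre_find_todo todos todo_id → Spec_find_todo todos todo_id (find_todo todos todo_id)

-- ===== LEMMAS AND PROOFS =====

-- if A's first loop returns t, B's loop returns t whatever its accumulated state is
theorem altLoop_of_exact (id : String) (w : Bool) (l : List (List (String × String)))
    (t : List (String × String)) (h : findExact l id = some t) :
    ∀ hit cnt, altLoop id w l hit cnt = some t := by
  induction l with
  | nil => simp [findExact] at h
  | cons x rest ih =>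
    intro hit cnt
    simp only [findExact] at h
    simp only [altLoop]
    by_cases hx : (getIdD x == id) = true
    · rw [if_pos hx] at h ⊢; exact h
    · rw [if_neg hx] at h ⊢
      split
      · exact ih h _ _
      · exact ih h _ _

-- if A's first loop finds nothing, B's loop tallies exactly A's filter-based second phase
theorem altLoop_of_no_exact (id : String) (w : Bool) (l : List (List (String × String)))
    (h : findExact l id = none) : ∀ hit cnt,
    altLoop id w l hit cnt =
      (if cnt + ((l.filter (fun t => w && PySem.Str.startswith (getIdD t) id)).length : Int) = 1
       then hit.or (l.filter (fun t => w && PySem.Str.startswith (getIdD t) id)).head?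
       else none) := by
  induction l with
  | nil =>
    intro hit cnt
    simp only [altLoop, List.filter_nil, List.length_nil, Nat.cast_zero, add_zero,
      List.head?_nil, Option.or_none, beq_iff_eq]
  | cons x rest ih =>
    intro hit cnt
    simp only [findExact] at h
    by_cases hx : (getIdD x == id) = true
    · rw [if_pos hx] at h; exact absurd h (by simp)
    · rw [if_neg hx] at h
      simp only [altLoop]
      rw [if_neg hx]
      by_cases hp : (w && PySem.Str.startswith (getIdD x) id) = true
      · rw [if_pos hp, ih h]
        simp only [List.filter_cons]
        rw [if_pos hp]
        simp only [List.length_cons, Nat.cast_add, Nat.cast_one, List.head?_cons]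
        cases hit <;>
          simp only [Option.isNone_none, Option.isNone_some, reduceIte] <;>
          split_ifs with h1 h2 <;>
          first
            | rfl
            | exact h2.elim
            | exact absurd (by omega) h2
            | exact absurd (by omega) h1
      · rw [if_neg hp, ih h]
        simp only [List.filter_cons]
        rw [if_neg hp]

-- the if-length-1 head of a filtered list equals A's cands[0] under cands.length == 1
theorem a_second_phase (p : List (String × String) → Bool) (l : List (List (String × String))) :
    (if (l.filter p).length == 1 then PySem.List.pyGet? (l.filter p) 0 else none) =
      (if (0 : Int) + ((l.filter p).length : Int) = 1 then (none : Option (List (String × String))).or (l.filter p).head? else none) := by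
  cases hm : l.filter p with
  | nil => simp
  | cons y ys =>
    cases ys with
    | nil => simp [PySem.List.pyGet?, PySem.List.pyIdx?, Option.or]
    | cons z zs =>
      rw [if_neg (by simp), if_neg (by simp only [List.length_cons, Nat.cast_add, Nat.cast_one]; omega)]

-- ===== VERDICT (by name: the statement is the Claim_ definition above) =====
theorem find_todo_spec : Claim_equal_find_todo := by
  intro todos todo_id _ _
  unfold Spec_find_todo find_todo find_todo_alt
  cases h : findExact todos todo_id with
  | some t => rw [altLoop_of_exact todo_id _ todos t h]
  | none =>
    rw [altLoop_of_no_exact todo_id _ todos h none 0]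
    by_cases hw : 4 ≤ PySem.Str.len todo_id
    · have hw' : (decide (4 ≤ PySem.Str.len todo_id)) = true := decide_eq_true hw
      rw [if_pos hw]
      simp only [hw', Bool.true_and]
      exact a_second_phase _ todos
    · have hw' : (decide (4 ≤ PySem.Str.len todo_id)) = false := decide_eq_false hw
      rw [if_neg hw]
      simp only [hw', Bool.false_and, List.filter_false, List.length_nil,
        Nat.cast_zero, add_zero, List.head?_nil, Option.or_none]
      rw [if_neg (by omega)]
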